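-- pv_equiv track=rewrite | github.com/allen-sk8/NTHU-KineMech | Baseball_Event_Annotation/ultralytics_yolo/pipeline.py | compress_foot_seq
-- ===== SOURCE A (Python) =====
-- def compress_foot_seq(foot_seq, max_gap=2):
--     """
--     foot_seq: List[(side, frame_idx, kind)] 已依時間排序
--     max_gap: 多少 frame 以內視為同一個「落地事件」
--     回傳: 壓縮後的 foot_seq
--     """
--     if not foot_seq:
--         return []
--
--     compressed = []
--     cur_side, cur_frame, cur_kind = foot_seq[0]
--
--     for side, frame, kind in foot_seq[1:]:
--         # 同一隻腳，且 frame 差距很小 → 視為同一事件，取最早的那幀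
--         if side == cur_side and (frame - cur_frame) <= max_gap:
--             continue
--         else:
--             compressed.append((cur_side, cur_frame, cur_kind))
--             cur_side, cur_frame, cur_kind = side, frame, kind
--
--     compressed.append((cur_side, cur_frame, cur_kind))
--     return compressed
-- ===== SOURCE B (Python) =====
-- def compress_foot_seq(foot_seq, max_gap=2):
--     """
--     foot_seq: List[(side, frame_idx, kind)] sorted by time
--     Group-skip rewrite: take the head as the group's anchor, skip the whole
--     run of same-side events within max_gap of the anchor frame, emit the
--     anchor once, and continue on the remaining tail.
--     """
--     out = []
--     rest = foot_seq
--     while rest: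
--         side, frame, kind = rest[0]
--         tail = rest[1:]
--         while tail and tail[0][0] == side and tail[0][1] - frame <= max_gap:
--             tail = tail[1:]
--         out.append((side, frame, kind))
--         rest = tail
--     return out
-- ===== Notes on version B (the rewrite author's own statement) =====
-- stated objective: alternative
-- what changed: Replaces A's single pass with carried current-event state and a deferred final append by a group-at-a-time skip loop: each iteration takes the head as the anchor, skips the whole run of mergeable followers, emits the anchor immediately, and recurses on the remaining tail.
import Mathlib
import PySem

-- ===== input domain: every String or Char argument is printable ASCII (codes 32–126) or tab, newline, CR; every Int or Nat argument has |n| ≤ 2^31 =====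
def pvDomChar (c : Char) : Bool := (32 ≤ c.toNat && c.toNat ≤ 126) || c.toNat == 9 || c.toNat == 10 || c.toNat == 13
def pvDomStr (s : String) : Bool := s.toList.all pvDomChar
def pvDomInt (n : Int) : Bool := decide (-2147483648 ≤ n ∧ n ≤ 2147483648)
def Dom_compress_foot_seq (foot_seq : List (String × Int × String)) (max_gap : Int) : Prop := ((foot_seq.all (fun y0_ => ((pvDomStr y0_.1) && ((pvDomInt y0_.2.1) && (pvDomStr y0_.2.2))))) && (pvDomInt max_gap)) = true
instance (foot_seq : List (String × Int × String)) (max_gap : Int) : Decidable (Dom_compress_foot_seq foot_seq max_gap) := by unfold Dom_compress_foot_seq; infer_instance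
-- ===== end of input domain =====

-- B replaces A's carried-state pass (deferred append of the current event) by a
-- group-at-a-time skip loop that emits each anchor immediately; alternative
-- decomposition, same O(n) cost.


-- ===== PORT A =====
-- the for-loop over foot_seq[1:] with state (cur_side, cur_frame, cur_kind) and the
-- accumulator 'compressed'; the trailing append happens in the [] case
def pvALoop (rest : List (String × Int × String)) (cur : String × Int × String)
    (compressed : List (String × Int × String)) (max_gap : Int) : List (String × Int × String) :=
  match rest with
  | [] => compressed ++ [cur]
  | (side, frame, kind) :: t =>
    if side = cur.1 ∧ frame - cur.2.1 ≤ max_gap then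
      pvALoop t cur compressed max_gap
    else
      pvALoop t (side, frame, kind) (compressed ++ [cur]) max_gap

def compress_foot_seq (foot_seq : List (String × Int × String)) (max_gap : Int) : List (String × Int × String) :=
  match foot_seq with
  | [] => []
  | cur :: rest => pvALoop rest cur [] max_gap

-- ===== PORT B =====
-- inner while: drop the run of same-side events within max_gap of the anchor frame
def pvBSkip (tail : List (String × Int × String)) (side : String) (frame max_gap : Int) : List (String × Int × String) :=
  match tail with
  | [] => []
  | (s, f, k) :: t =>
    if s = side ∧ f - frame ≤ max_gap then pvBSkip t side frame max_gap
    else (s, f, k) :: t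

theorem pvBSkip_len_le (tail : List (String × Int × String)) (side : String) (frame max_gap : Int) :
    (pvBSkip tail side frame max_gap).length ≤ tail.length := by
  induction tail with
  | nil => simp [pvBSkip]
  | cons h t ih =>
    obtain ⟨s, f, k⟩ := h
    simp only [pvBSkip]
    split
    · exact le_trans ih (Nat.le_succ _)
    · simp

-- outer while over 'rest'
def compress_foot_seq_alt (foot_seq : List (String × Int × String)) (max_gap : Int) : List (String × Int × String) :=
  match foot_seq with
  | [] => []
  | (side, frame, kind) :: tail =>
    (side, frame, kind) :: compress_foot_seq_alt (pvBSkip tail side frame max_gap) max_gap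
termination_by foot_seq.length
decreasing_by
  exact Nat.lt_succ_of_le (pvBSkip_len_le tail side frame max_gap)

-- ===== PRECONDITION & SPEC =====
def Spec_compress_foot_seq (foot_seq : List (String × Int × String)) (max_gap : Int) (out : List (String × Int × String)) : Prop := out = compress_foot_seq_alt foot_seq max_gap
instance (foot_seq : List (String × Int × String)) (max_gap : Int) (out : List (String × Int × String)) : Decidable (Spec_compress_foot_seq foot_seq max_gap out) := by unfold Spec_compress_foot_seq; infer_instance

-- ===== CLAIM (what is proved, stated in full; the proofs are below) =====
def Claim_equal_compress_foot_seq : Prop := ∀ (foot_seq : List (String × Int × String)) (max_gap : Int), Dom_compress_foot_seq foot_seq max_gap → Spec_compress_foot_seq foot_seq max_gap (compress_foot_seq foot_seq max_gap)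

-- ===== LEMMAS AND PROOFS =====
theorem pvALoop_eq (rest : List (String × Int × String)) :
    ∀ (cur : String × Int × String) (compressed : List (String × Int × String)) (max_gap : Int),
    pvALoop rest cur compressed max_gap =
      compressed ++ cur :: compress_foot_seq_alt (pvBSkip rest cur.1 cur.2.1 max_gap) max_gap := by
  induction rest with
  | nil =>
    intro cur compressed max_gap
    simp [pvALoop, pvBSkip, compress_foot_seq_alt]
  | cons h t ih =>
    intro cur compressed max_gap
    obtain ⟨s, f, k⟩ := h
    simp only [pvALoop, pvBSkip]
    split
    · exact ih cur compressed max_gap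
    · rw [ih (s, f, k) (compressed ++ [cur]) max_gap]
      simp [compress_foot_seq_alt]

-- ===== VERDICT (by name: the statement is the Claim_ definition above) =====
theorem compress_foot_seq_spec : Claim_equal_compress_foot_seq := by
  intro foot_seq max_gap _
  unfold Spec_compress_foot_seq
  match foot_seq with
  | [] => simp [compress_foot_seq, compress_foot_seq_alt]
  | (side, frame, kind) :: rest =>
    show pvALoop rest (side, frame, kind) [] max_gap = _
    rw [pvALoop_eq]
    simp [compress_foot_seq_alt]
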